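-- pv_equiv track=rewrite | github.com/GeekyAmit5/Competative | test6.py | findUpper
-- ===== SOURCE A (Python) =====
-- def findUpper(x):
--     s = str(x)
--     ns = ''
--     t = True
--     for i in s:
--         if t and int(i) % 2:
--             ns += str(int(i)+1)
--             t = False
--         else:
--             if not t:
--                 ns += '0'
--             else:
--                 ns += i
--     return int(ns)
-- ===== SOURCE B (Python) =====
-- def findUpper(x):
--     s = str(x)
--     for idx, ch in enumerate(s):
--         d = int(ch)
--         if d % 2:
--             return int(s[:idx] + str(d + 1) + '0' * (len(s) - idx - 1))
--     return int(s)
-- ===== Notes on version B (the rewrite author's own statement) =====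
-- stated objective: simpler
-- what changed: Replaces A's per-character accumulator string with a boolean state flag by a locate-the-first-odd-digit scan that builds the whole result in one slice + str(d+1) + '0'*k expression (or returns int(s) unchanged when no odd digit exists).
import Mathlib
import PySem

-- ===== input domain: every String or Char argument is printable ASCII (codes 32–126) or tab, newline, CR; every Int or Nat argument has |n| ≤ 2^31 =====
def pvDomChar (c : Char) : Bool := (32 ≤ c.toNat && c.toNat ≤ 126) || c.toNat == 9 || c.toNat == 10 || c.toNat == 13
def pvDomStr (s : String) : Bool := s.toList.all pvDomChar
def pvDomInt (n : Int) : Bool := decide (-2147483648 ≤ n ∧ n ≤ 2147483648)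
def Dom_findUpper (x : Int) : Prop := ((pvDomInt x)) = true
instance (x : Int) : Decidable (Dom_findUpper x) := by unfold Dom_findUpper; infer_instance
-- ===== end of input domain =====

-- B replaces A's per-character accumulator + boolean flag by locating the first odd digit
-- and building the result in one slice ++ str(d+1) ++ '0'*k expression (objective: simpler).

-- ===== PORT A =====
-- A's loop: state (ns, t); 'if t and int(i) % 2' with its short-circuit kept.
def findUpperLoopA : List Char → List Char → Bool → Option (List Char)
  | [], ns, _ => some ns
  | c :: rest, ns, t =>
      if t then
        match PySem.Int.ofChars? [c] with
        | none => none   -- int(i) raises ValueError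
        | some d =>
          if PySem.Int.mod d 2 ≠ 0 then
            findUpperLoopA rest (ns ++ PySem.Int.toChars (d + 1)) false
          else
            findUpperLoopA rest (ns ++ [c]) true
      else
        findUpperLoopA rest (ns ++ ['0']) false

def findUpper (x : Int) : Int :=
  match findUpperLoopA (PySem.Int.toChars x) [] true with
  | some ns => (PySem.Int.ofChars? ns).getD 0
  | none => 0

-- ===== PORT B =====
-- B's loop over enumerate(s): find the first odd digit, then build the answer at once.
def findUpperScanB : List Char → Nat → List Char → Option Int
  | [], _, s => PySem.Int.ofChars? s                      -- return int(s)
  | c :: rest, idx, s =>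
      match PySem.Int.ofChars? [c] with
      | none => none                                      -- int(ch) raises ValueError
      | some d =>
        if PySem.Int.mod d 2 ≠ 0 then
          PySem.Int.ofChars?
            (PySem.List.slice s none (some (idx : Int)) ++ PySem.Int.toChars (d + 1)
              ++ List.replicate (s.length - idx - 1) '0')
        else
          findUpperScanB rest (idx + 1) s

def findUpper_alt (x : Int) : Int :=
  (findUpperScanB (PySem.Int.toChars x) 0 (PySem.Int.toChars x)).getD 0

-- ===== PRECONDITION & SPEC =====
-- Pre_ excludes negative x, on which Python's int('-') at the sign character raises ValueError.
def Pre_findUpper (x : Int) : Prop := 0 ≤ x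
instance (x : Int) : Decidable (Pre_findUpper x) := by unfold Pre_findUpper; infer_instance
def pvWitness_findUpper : Int := 2469

def Spec_findUpper (x : Int) (out : Int) : Prop := out = findUpper_alt x
instance (x : Int) (out : Int) : Decidable (Spec_findUpper x out) := by unfold Spec_findUpper; infer_instance

-- ===== CLAIM (what is proved, stated in full; the proofs are below) =====
def Claim_equal_findUpper : Prop := ∀ (x : Int), Dom_findUpper x → Pre_findUpper x → Spec_findUpper x (findUpper x)

-- ===== LEMMAS AND PROOFS =====

-- Once the flag is false, A only appends one '0' per remaining character.
theorem loopA_false (rest : List Char) : ∀ (ns : List Char),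
    findUpperLoopA rest ns false = some (ns ++ List.replicate rest.length '0') := by
  induction rest with
  | nil => intro ns; simp [findUpperLoopA]
  | cons c rest ih =>
      intro ns
      simp [findUpperLoopA, ih, List.replicate_succ, List.append_assoc]

-- Main invariant: A's remaining loop with accumulated prefix `pre` agrees with B's scan.
theorem loopA_scanB (rest : List Char) : ∀ (pre : List Char),
    (match findUpperLoopA rest pre true with
     | some ns => (PySem.Int.ofChars? ns).getD 0
     | none => 0)
    = (findUpperScanB rest pre.length (pre ++ rest)).getD 0 := by
  induction rest with
  | nil => intro pre; simp [findUpperLoopA, findUpperScanB]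
  | cons c rest ih =>
      intro pre
      simp only [findUpperLoopA, findUpperScanB, if_true]
      cases h : PySem.Int.ofChars? [c] with
      | none => simp
      | some d =>
          by_cases hodd : PySem.Int.mod d 2 ≠ 0
          · simp only [if_pos hodd, loopA_false]
            have hslice : PySem.List.slice (pre ++ c :: rest) none (some ((pre.length : Nat) : Int))
                = pre := by
              rw [PySem.List.slice_to_natCast]
              simp
            have hlen : (pre ++ c :: rest).length - pre.length - 1 = rest.length := by
              simp
            rw [hslice, hlen]
          · simp only [if_neg hodd]
            have := ih (pre ++ [c])
            simpa [List.append_assoc] using this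

-- ===== VERDICT (by name: the statement is the Claim_ definition above) =====
theorem findUpper_spec : Claim_equal_findUpper := by
  intro x _ _
  show findUpper x = findUpper_alt x
  have h := loopA_scanB (PySem.Int.toChars x) []
  simpa [findUpper, findUpper_alt] using h
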